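-- pv_equiv track=rewrite | github.com/okta/okta-ocsf-syslog | app.py | get_audit_category
-- ===== SOURCE A (Python) =====
-- def get_audit_category(event_type):
--     """
--     Function captures the event category name for an event logged by Okta
--     get_audit_category function is dedicated for all the Audit Activity Events
--     This function can be enhanced as more events are included
--     Returns
--     ------
--     category_name: Name of the event category
--     category_uid: Category unique identifier for the activity
--     """
--     audit_event_types = [
--         "user.session.start",
--         "user.session.access_admin_app",
--         "user.session.end",
--         "user.authentication",
--         "app.oauth2",
--         "policy.evaluate_sign_on",
--     ]
--
--     if event_type and any(
--         audit_event in event_type for audit_event in audit_event_types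
--     ):
--         return "Audit Activity events", 3
--
--     return "Unknown", 0
-- ===== SOURCE B (Python) =====
-- # First-character index: audit substrings grouped by their first letter, so the
-- # scan visits each start position once and only tests candidates that can match there.
-- _INDEX = {
--     "u": [
--         "user.session.start",
--         "user.session.access_admin_app",
--         "user.session.end",
--         "user.authentication",
--     ],
--     "a": ["app.oauth2"],
--     "p": ["policy.evaluate_sign_on"],
-- }
--
--
-- def get_audit_category(event_type):
--     if event_type:
--         for i in range(len(event_type)):
--             for p in _INDEX.get(event_type[i], []):
--                 if event_type.startswith(p, i):
--                     return "Audit Activity events", 3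
--     return "Unknown", 0
-- ===== Notes on version B (the rewrite author's own statement) =====
-- stated objective: alternative
-- what changed: Replaces six independent full substring scans with a single left-to-right position scan over the string that dispatches through a dict keyed by first character, testing only the candidate patterns whose first letter matches at each position.
import Mathlib
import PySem

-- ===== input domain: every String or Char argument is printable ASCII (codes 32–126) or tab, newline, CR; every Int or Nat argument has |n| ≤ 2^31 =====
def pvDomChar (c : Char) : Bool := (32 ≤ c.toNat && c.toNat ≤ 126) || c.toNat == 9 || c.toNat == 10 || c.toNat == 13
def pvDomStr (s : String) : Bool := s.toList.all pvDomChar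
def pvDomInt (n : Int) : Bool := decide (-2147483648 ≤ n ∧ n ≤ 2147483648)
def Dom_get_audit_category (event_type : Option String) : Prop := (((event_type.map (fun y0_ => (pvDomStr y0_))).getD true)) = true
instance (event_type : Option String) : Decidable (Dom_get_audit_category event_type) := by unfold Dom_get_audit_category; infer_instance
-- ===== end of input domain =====

-- ===== PORT A =====
-- B changes: a single left-to-right position scan dispatching through a dict keyed by
-- the first character of each audit substring, instead of six independent full
-- substring scans (objective: alternative; same return values).
-- the module-level list of audit event substrings of A
def auditEventTypesA : List String :=
  ["user.session.start", "user.session.access_admin_app", "user.session.end",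
   "user.authentication", "app.oauth2", "policy.evaluate_sign_on"]

-- port of A: 'if event_type and any(audit_event in event_type for audit_event in ...)'
def get_audit_category (event_type : Option String) : String × Int :=
  match event_type with
  | none => ("Unknown", 0)
  | some s =>
    if s ≠ "" && auditEventTypesA.any (fun p => PySem.Str.isIn p s) then
      ("Audit Activity events", 3)
    else
      ("Unknown", 0)

-- ===== PORT B =====
-- B's module-level _INDEX dict: audit substrings grouped by first character
def auditIndex : PySem.Dict Char (List String) :=
  PySem.Dict.ofList
    [('u', ["user.session.start", "user.session.access_admin_app",
            "user.session.end", "user.authentication"]),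
     ('a', ["app.oauth2"]),
     ('p', ["policy.evaluate_sign_on"])]

-- the 'for i in range(len(event_type)): for p in _INDEX.get(event_type[i], []):
-- if event_type.startswith(p, i): return …' loop: recursion over the suffixes of the
-- string (suffix starting at i has head event_type[i]); early return = '|| rest'
def scanIndex : List Char → Bool
  | [] => false
  | c :: rest =>
      ((auditIndex.getD c []).any fun p => PySem.Chars.startswith (c :: rest) p.toList)
      || scanIndex rest

def get_audit_category_alt (event_type : Option String) : String × Int :=
  match event_type with
  | none => ("Unknown", 0)
  | some s =>
    if s ≠ "" && scanIndex s.toList then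
      ("Audit Activity events", 3)
    else
      ("Unknown", 0)

-- ===== PRECONDITION & SPEC =====
def Spec_get_audit_category (event_type : Option String) (out : String × Int) : Prop := out = get_audit_category_alt event_type
instance (event_type : Option String) (out : String × Int) : Decidable (Spec_get_audit_category event_type out) := by unfold Spec_get_audit_category; infer_instance

-- ===== CLAIM (what is proved, stated in full; the proofs are below) =====
def Claim_equal_get_audit_category : Prop := ∀ (event_type : Option String), Dom_get_audit_category event_type → Spec_get_audit_category event_type (get_audit_category event_type)

-- ===== LEMMAS AND PROOFS =====

-- At one position, the first-char dispatch tests exactly the patterns that could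
-- match there: for every other pattern 'startswith' is false on its first character.
theorem index_dispatch_eq (c : Char) (rest : List Char) :
    ((auditIndex.getD c []).any fun p => PySem.Chars.startswith (c :: rest) p.toList)
      = (auditEventTypesA.any fun p => PySem.Chars.startswith (c :: rest) p.toList) := by
  by_cases hu : c = 'u'
  · subst hu
    have h : auditIndex.getD 'u' [] =
        ["user.session.start", "user.session.access_admin_app",
         "user.session.end", "user.authentication"] := by decide
    rw [h]
    simp [auditEventTypesA, PySem.Chars.startswith, List.isPrefixOf]
  · by_cases ha : c = 'a'
    · subst ha
      have h : auditIndex.getD 'a' [] = ["app.oauth2"] := by decide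
      rw [h]
      simp [auditEventTypesA, PySem.Chars.startswith, List.isPrefixOf]
    · by_cases hp : c = 'p'
      · subst hp
        have h : auditIndex.getD 'p' [] = ["policy.evaluate_sign_on"] := by decide
        rw [h]
        simp [auditEventTypesA, PySem.Chars.startswith, List.isPrefixOf]
      · have hitems : auditIndex.items =
            [('u', ["user.session.start", "user.session.access_admin_app",
                    "user.session.end", "user.authentication"]),
             ('a', ["app.oauth2"]), ('p', ["policy.evaluate_sign_on"])] := by decide
        have e1 : ('u' == c) = false := by simp [Ne.symm hu]
        have e2 : ('a' == c) = false := by simp [Ne.symm ha]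
        have e3 : ('p' == c) = false := by simp [Ne.symm hp]
        have h : auditIndex.getD c [] = [] := by
          simp [PySem.Dict.getD, PySem.Dict.get?, hitems, List.find?, e1, e2, e3]
        rw [h]
        simp [auditEventTypesA, PySem.Chars.startswith, List.isPrefixOf,
          Ne.symm hu, Ne.symm ha, Ne.symm hp]

-- The position scan over the suffixes equals the per-pattern substring tests.
theorem scanIndex_eq_any_isIn (l : List Char) :
    scanIndex l = (auditEventTypesA.any fun p => PySem.Chars.isIn p.toList l) := by
  induction l with
  | nil => decide
  | cons c rest ih =>
    rw [scanIndex, index_dispatch_eq, ih]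
    rw [Bool.eq_iff_iff]
    simp only [Bool.or_eq_true, List.any_eq_true, PySem.Chars.startswith_iff,
      PySem.Chars.isIn_iff_infix]
    constructor
    · rintro (⟨p, hp, hpre⟩ | ⟨p, hp, hinf⟩)
      · exact ⟨p, hp, hpre.isInfix⟩
      · exact ⟨p, hp, hinf.trans (List.suffix_cons c rest).isInfix⟩
    · rintro ⟨p, hp, hinf⟩
      rcases hinf with ⟨pre, suf, heq⟩
      cases pre with
      | nil => exact Or.inl ⟨p, hp, suf, by simpa using heq⟩
      | cons x xs =>
        refine Or.inr ⟨p, hp, ?_⟩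
        cases heq
        exact ⟨xs, suf, rfl⟩

-- ===== VERDICT (by name: the statement is the Claim_ definition above) =====
theorem get_audit_category_spec : Claim_equal_get_audit_category := by
  intro event_type _
  unfold Spec_get_audit_category
  cases event_type with
  | none => rfl
  | some s =>
    simp only [get_audit_category, get_audit_category_alt, scanIndex_eq_any_isIn,
      PySem.Str.isIn]
    rfl
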